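-- pv_equiv track=rewrite | github.com/Claudio-Me/coding_challange_enspired | analysis/floor_plan_generator.py | _partition_space
-- ===== SOURCE A (Python) =====
-- def _partition_space(
--     r1: int, c1: int, r2: int, c2: int, num_rooms: int
-- ) -> list[tuple[int, int, int, int]]:
--     """
--     Recursively partition a space into rooms.
--
--     Returns list of (r1, c1, r2, c2) tuples for each room.
--     """
--     if num_rooms <= 1:
--         return [(r1, c1, r2, c2)]
--
--     height = r2 - r1
--     width = c2 - c1
--
--     # Need minimum 3 cells per room (wall + content + wall)
--     if height < 6 and width < 6:
--         return [(r1, c1, r2, c2)]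
--
--     # Decide split direction (prefer splitting the longer dimension)
--     if height >= width and height >= 6:
--         # Horizontal split
--         split_point = r1 + height // 2
--         rooms_top = num_rooms // 2
--         rooms_bottom = num_rooms - rooms_top
--
--         top = _partition_space(r1, c1, split_point, c2, rooms_top)
--         bottom = _partition_space(split_point, c1, r2, c2, rooms_bottom)
--         return top + bottom
--     elif width >= 6:
--         # Vertical split
--         split_point = c1 + width // 2
--         rooms_left = num_rooms // 2
--         rooms_right = num_rooms - rooms_left
--
--         left = _partition_space(r1, c1, r2, split_point, rooms_left)
--         right = _partition_space(r1, split_point, r2, c2, rooms_right)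
--         return left + right
--     else:
--         return [(r1, c1, r2, c2)]
-- ===== SOURCE B (Python) =====
-- def _partition_space(
--     r1: int, c1: int, r2: int, c2: int, num_rooms: int
-- ) -> list[tuple[int, int, int, int]]:
--     """Iterative version: explicit LIFO stack of frames, preorder output."""
--     result = []
--     stack = [(r1, c1, r2, c2, num_rooms)]
--     while stack:
--         a, b, c, d, n = stack.pop()
--         height = c - a
--         width = d - b
--         if n <= 1 or (height < 6 and width < 6):
--             result.append((a, b, c, d))
--         elif height >= width and height >= 6:
--             split_point = a + height // 2
--             k = n // 2
--             stack.append((split_point, b, c, d, n - k))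
--             stack.append((a, b, split_point, d, k))
--         elif width >= 6:
--             split_point = b + width // 2
--             k = n // 2
--             stack.append((a, split_point, c, d, n - k))
--             stack.append((a, b, c, split_point, k))
--         else:
--             result.append((a, b, c, d))
--     return result
-- ===== Notes on version B (the rewrite author's own statement) =====
-- stated objective: alternative
-- what changed: Replaced the recursive divide-and-conquer (two recursive calls concatenated) by an iterative explicit LIFO stack of frames with an accumulating result list, pushing the second child before the first to reproduce the preorder output.
import Mathlib
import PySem

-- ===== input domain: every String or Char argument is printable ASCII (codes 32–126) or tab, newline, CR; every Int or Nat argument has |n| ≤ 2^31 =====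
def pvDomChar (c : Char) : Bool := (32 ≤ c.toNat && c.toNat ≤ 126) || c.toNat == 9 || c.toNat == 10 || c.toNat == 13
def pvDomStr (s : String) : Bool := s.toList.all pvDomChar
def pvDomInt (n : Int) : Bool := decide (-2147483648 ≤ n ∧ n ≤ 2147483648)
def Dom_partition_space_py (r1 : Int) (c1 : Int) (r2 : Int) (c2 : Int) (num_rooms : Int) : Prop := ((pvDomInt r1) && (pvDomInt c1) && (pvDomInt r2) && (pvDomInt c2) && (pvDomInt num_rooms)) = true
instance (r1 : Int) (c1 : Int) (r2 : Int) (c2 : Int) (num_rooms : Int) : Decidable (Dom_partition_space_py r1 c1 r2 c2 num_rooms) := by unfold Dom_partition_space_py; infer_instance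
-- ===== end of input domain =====

-- B rewrites A's recursive divide-and-conquer as an iterative explicit LIFO stack loop with an
-- accumulating result list (objective: alternative decomposition, same cost).
-- Both ports carry a Nat fuel argument purely as a totality guard; the proofs below show the
-- fuel chosen at the entry point is never exhausted.

-- ===== PORT A =====
-- A's recursion, with fuel: one unit of fuel per recursion level ((r2-r1)+(c2-c1) shrinks by ≥ 3 per split)
def pvRunA (fuel : Nat) (r1 : Int) (c1 : Int) (r2 : Int) (c2 : Int) (num_rooms : Int) : List (Int × Int × Int × Int) :=
  match fuel with
  | 0 => [(r1, c1, r2, c2)]  -- fuel guard, never reached from partition_space_py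
  | fuel + 1 =>
    if num_rooms ≤ 1 then [(r1, c1, r2, c2)]
    else if r2 - r1 < 6 ∧ c2 - c1 < 6 then [(r1, c1, r2, c2)]
    else if r2 - r1 ≥ c2 - c1 ∧ r2 - r1 ≥ 6 then
      pvRunA fuel r1 c1 (r1 + PySem.Int.floordiv (r2 - r1) 2) c2 (PySem.Int.floordiv num_rooms 2) ++
      pvRunA fuel (r1 + PySem.Int.floordiv (r2 - r1) 2) c1 r2 c2 (num_rooms - PySem.Int.floordiv num_rooms 2)
    else if c2 - c1 ≥ 6 then
      pvRunA fuel r1 c1 r2 (c1 + PySem.Int.floordiv (c2 - c1) 2) (PySem.Int.floordiv num_rooms 2) ++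
      pvRunA fuel r1 (c1 + PySem.Int.floordiv (c2 - c1) 2) r2 c2 (num_rooms - PySem.Int.floordiv num_rooms 2)
    else [(r1, c1, r2, c2)]

def partition_space_py (r1 : Int) (c1 : Int) (r2 : Int) (c2 : Int) (num_rooms : Int) : List (Int × Int × Int × Int) :=
  pvRunA ((r2 - r1).toNat + (c2 - c1).toNat + 1) r1 c1 r2 c2 num_rooms

-- ===== PORT B =====
-- the while-loop of Source B: stack head = top of stack, result is the accumulator;
-- fuel = one unit per iteration (the forest processed has ≤ 2·max(num_rooms,1) − 1 nodes)
def pvLoop (fuel : Nat) (stack : List (Int × Int × Int × Int × Int)) (result : List (Int × Int × Int × Int)) : List (Int × Int × Int × Int) :=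
  match fuel, stack with
  | _, [] => result
  | 0, _ :: _ => result  -- fuel guard, never reached from partition_space_py_alt
  | fuel + 1, (a, b, c, d, n) :: rest =>
    if n ≤ 1 ∨ (c - a < 6 ∧ d - b < 6) then pvLoop fuel rest (result ++ [(a, b, c, d)])
    else if c - a ≥ d - b ∧ c - a ≥ 6 then
      pvLoop fuel ((a, b, a + PySem.Int.floordiv (c - a) 2, d, PySem.Int.floordiv n 2) ::
              (a + PySem.Int.floordiv (c - a) 2, b, c, d, n - PySem.Int.floordiv n 2) :: rest) result
    else if d - b ≥ 6 then
      pvLoop fuel ((a, b, c, b + PySem.Int.floordiv (d - b) 2, PySem.Int.floordiv n 2) ::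
              (a, b + PySem.Int.floordiv (d - b) 2, c, d, n - PySem.Int.floordiv n 2) :: rest) result
    else pvLoop fuel rest (result ++ [(a, b, c, d)])

def partition_space_py_alt (r1 : Int) (c1 : Int) (r2 : Int) (c2 : Int) (num_rooms : Int) : List (Int × Int × Int × Int) :=
  pvLoop (2 * (num_rooms.toNat + 1)) [(r1, c1, r2, c2, num_rooms)] []

-- ===== PRECONDITION & SPEC =====
def Spec_partition_space_py (r1 : Int) (c1 : Int) (r2 : Int) (c2 : Int) (num_rooms : Int) (out : List (Int × Int × Int × Int)) : Prop := out = partition_space_py_alt r1 c1 r2 c2 num_rooms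
instance (r1 : Int) (c1 : Int) (r2 : Int) (c2 : Int) (num_rooms : Int) (out : List (Int × Int × Int × Int)) : Decidable (Spec_partition_space_py r1 c1 r2 c2 num_rooms out) := by unfold Spec_partition_space_py; infer_instance

-- ===== CLAIM (what is proved, stated in full; the proofs are below) =====
def Claim_equal_partition_space_py : Prop := ∀ (r1 : Int) (c1 : Int) (r2 : Int) (c2 : Int) (num_rooms : Int), Dom_partition_space_py r1 c1 r2 c2 num_rooms → Spec_partition_space_py r1 c1 r2 c2 num_rooms (partition_space_py r1 c1 r2 c2 num_rooms)

-- ===== LEMMAS AND PROOFS =====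

-- floordiv by the positive literal 2 equals Int ediv
theorem pvFd2 (a : Int) : PySem.Int.floordiv a 2 = a / 2 :=
  PySem.Int.floordiv_eq_ediv_of_pos (by norm_num)

-- the fuel-free recursion both ports compute (proof-side reference function)
def pvF (r1 : Int) (c1 : Int) (r2 : Int) (c2 : Int) (num_rooms : Int) : List (Int × Int × Int × Int) :=
  if num_rooms ≤ 1 then [(r1, c1, r2, c2)]
  else if r2 - r1 < 6 ∧ c2 - c1 < 6 then [(r1, c1, r2, c2)]
  else if r2 - r1 ≥ c2 - c1 ∧ r2 - r1 ≥ 6 then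
    pvF r1 c1 (r1 + PySem.Int.floordiv (r2 - r1) 2) c2 (PySem.Int.floordiv num_rooms 2) ++
    pvF (r1 + PySem.Int.floordiv (r2 - r1) 2) c1 r2 c2 (num_rooms - PySem.Int.floordiv num_rooms 2)
  else if c2 - c1 ≥ 6 then
    pvF r1 c1 r2 (c1 + PySem.Int.floordiv (c2 - c1) 2) (PySem.Int.floordiv num_rooms 2) ++
    pvF r1 (c1 + PySem.Int.floordiv (c2 - c1) 2) r2 c2 (num_rooms - PySem.Int.floordiv num_rooms 2)
  else [(r1, c1, r2, c2)]
termination_by ((r2 - r1).toNat + (c2 - c1).toNat)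
decreasing_by
  all_goals simp only [pvFd2]; omega

-- number of frames the stack loop processes for one initial frame
def pvNodes (r1 : Int) (c1 : Int) (r2 : Int) (c2 : Int) (num_rooms : Int) : Nat :=
  if num_rooms ≤ 1 then 1
  else if r2 - r1 < 6 ∧ c2 - c1 < 6 then 1
  else if r2 - r1 ≥ c2 - c1 ∧ r2 - r1 ≥ 6 then
    1 + pvNodes r1 c1 (r1 + PySem.Int.floordiv (r2 - r1) 2) c2 (PySem.Int.floordiv num_rooms 2) +
    pvNodes (r1 + PySem.Int.floordiv (r2 - r1) 2) c1 r2 c2 (num_rooms - PySem.Int.floordiv num_rooms 2)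
  else if c2 - c1 ≥ 6 then
    1 + pvNodes r1 c1 r2 (c1 + PySem.Int.floordiv (c2 - c1) 2) (PySem.Int.floordiv num_rooms 2) +
    pvNodes r1 (c1 + PySem.Int.floordiv (c2 - c1) 2) r2 c2 (num_rooms - PySem.Int.floordiv num_rooms 2)
  else 1
termination_by ((r2 - r1).toNat + (c2 - c1).toNat)
decreasing_by
  all_goals simp only [pvFd2]; omega

theorem pvNodes_pos (r1 c1 r2 c2 n : Int) : 1 ≤ pvNodes r1 c1 r2 c2 n := by
  rw [pvNodes.eq_def]
  split_ifs <;> omega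

theorem pvNodes_le (r1 c1 r2 c2 n : Int) : pvNodes r1 c1 r2 c2 n ≤ 2 * max n.toNat 1 - 1 := by
  fun_induction pvNodes r1 c1 r2 c2 n with
  | case1 r1 c1 r2 c2 n h => omega
  | case2 r1 c1 r2 c2 n h1 h2 => omega
  | case3 r1 c1 r2 c2 n h1 h2 h3 ih1 ih2 =>
    simp only [pvFd2] at ih1 ih2 ⊢
    omega
  | case4 r1 c1 r2 c2 n h1 h2 h3 h4 ih1 ih2 =>
    simp only [pvFd2] at ih1 ih2 ⊢
    omega
  | case5 r1 c1 r2 c2 n h1 h2 h3 h4 => omega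

-- A's fuel is never exhausted: with fuel above the size measure, pvRunA computes pvF
theorem pvRunA_eq_pvF (fuel : Nat) : ∀ (r1 c1 r2 c2 n : Int), (r2 - r1).toNat + (c2 - c1).toNat < fuel → pvRunA fuel r1 c1 r2 c2 n = pvF r1 c1 r2 c2 n := by
  induction fuel with
  | zero => intro r1 c1 r2 c2 n h; omega
  | succ f ih =>
    intro r1 c1 r2 c2 n h
    rw [pvRunA]
    conv_rhs => rw [pvF.eq_def]
    split_ifs with h1 h2 h3 h4
    · rfl
    · rfl
    · rw [ih _ _ _ _ _ (by simp only [pvFd2]; omega), ih _ _ _ _ _ (by simp only [pvFd2]; omega)]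
    · rw [ih _ _ _ _ _ (by simp only [pvFd2]; omega), ih _ _ _ _ _ (by simp only [pvFd2]; omega)]
    · rfl

-- loop invariant: with enough fuel, pvLoop flushes the stack in preorder, appending each frame's partition
theorem pvLoop_eq (fuel : Nat) : ∀ (stack : List (Int × Int × Int × Int × Int)) (result : List (Int × Int × Int × Int)), (stack.map (fun f => pvNodes f.1 f.2.1 f.2.2.1 f.2.2.2.1 f.2.2.2.2)).sum ≤ fuel → pvLoop fuel stack result = result ++ stack.flatMap (fun f => pvF f.1 f.2.1 f.2.2.1 f.2.2.2.1 f.2.2.2.2) := by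
  induction fuel with
  | zero =>
    intro stack result h
    match stack with
    | [] => simp [pvLoop]
    | (a, b, c, d, n) :: rest =>
      exfalso
      have := pvNodes_pos a b c d n
      simp [List.map_cons, List.sum_cons] at h
      omega
  | succ f ih =>
    intro stack result h
    match stack with
    | [] => simp [pvLoop]
    | (a, b, c, d, n) :: rest =>
      simp only [List.map_cons, List.sum_cons] at h
      rw [pvNodes.eq_def] at h
      rw [pvLoop]
      simp only [List.flatMap_cons]
      by_cases hb : n ≤ 1 ∨ (c - a < 6 ∧ d - b < 6)
      · rw [if_pos hb, ih _ _ (by rcases hb with hb | hb <;> simp [hb] at h <;> omega)]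
        conv_rhs => rw [pvF.eq_def]
        rcases hb with hb | hb
        · simp [hb]
        · by_cases hn : n ≤ 1 <;> simp [hn, hb]
      · rw [if_neg hb]
        have hn : ¬ n ≤ 1 := by tauto
        have hsm : ¬ (c - a < 6 ∧ d - b < 6) := by tauto
        simp only [if_neg hn, if_neg hsm] at h
        by_cases hh : c - a ≥ d - b ∧ c - a ≥ 6
        · rw [if_pos hh, ih _ _ (by simp only [List.map_cons, List.sum_cons]; rw [if_pos hh] at h; omega)]
          conv_rhs => rw [pvF.eq_def]
          simp [hn, hsm, hh]
        · rw [if_neg hh] at h ⊢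
          by_cases hv : d - b ≥ 6
          · rw [if_pos hv, ih _ _ (by simp only [List.map_cons, List.sum_cons]; rw [if_pos hv] at h; omega)]
            conv_rhs => rw [pvF.eq_def]
            have hh' : ¬ (d ≤ c - a + b ∧ 6 ≤ c - a) := by omega
            simp [hn, hsm, hh', hv]
          · rw [if_neg hv, ih _ _ (by rw [if_neg hv] at h; omega)]
            conv_rhs => rw [pvF.eq_def]
            have hh' : ¬ (d ≤ c - a + b ∧ 6 ≤ c - a) := by omega
            simp [hn, hsm, hh', hv]

-- ===== VERDICT (by name: the statement is the Claim_ definition above) =====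
theorem partition_space_py_spec : Claim_equal_partition_space_py := by
  intro r1 c1 r2 c2 num_rooms _
  unfold Spec_partition_space_py partition_space_py partition_space_py_alt
  rw [pvRunA_eq_pvF _ _ _ _ _ _ (by omega)]
  rw [pvLoop_eq _ _ _ (by
    simp only [List.map_cons, List.map_nil, List.sum_cons, List.sum_nil]
    have h1 := pvNodes_le r1 c1 r2 c2 num_rooms
    omega)]
  simp
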